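-- pv_equiv track=rewrite | github.com/MikeSrz/Python_Practice_Programs | my_tools/graphics.py | create_square
-- ===== SOURCE A (Python) =====
-- def create_square(height, width, fill=True, tabs=0):
--     square = []
--     for i in range (height):
--         square.append([])
--         for j in range (width+tabs):
--             square[i].append(False)
--             if i == 0 or i == (height-1):
--                 #Una excepción en la primera fila y en la última
--                 square[i][j] = (j >= tabs)
--                 continue
--
--             if fill:
--                 square[i][j] = (j >= tabs)
--             else:
--                     square[i][j] = (j == tabs or j == (width+tabs-1))
--
--     return square
-- ===== SOURCE B (Python) =====
-- def create_square(height, width, fill=True, tabs=0):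
--     # Column-major construction: build each column j as a whole (a constant
--     # column when fill, else a constant column with its two ends patched),
--     # then transpose to rows.
--     if height <= 0:
--         return []
--     n = width + tabs
--     cols = []
--     for j in range(n):
--         if fill:
--             cols.append([j >= tabs] * height)
--         else:
--             col = [j == tabs or j == n - 1] * height
--             if height > 0:
--                 col[0] = j >= tabs
--                 col[-1] = j >= tabs
--             cols.append(col)
--     return [[col[i] for col in cols] for i in range(height)]
-- ===== Notes on version B (the rewrite author's own statement) =====
-- stated objective: alternative
-- what changed: B builds the grid column-major -- each column is created whole as a replicated constant column, with its two endpoints patched in the hollow case -- and then transposes to rows, instead of A's row-major per-cell double loop of append-then-overwrite.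
import Mathlib
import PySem

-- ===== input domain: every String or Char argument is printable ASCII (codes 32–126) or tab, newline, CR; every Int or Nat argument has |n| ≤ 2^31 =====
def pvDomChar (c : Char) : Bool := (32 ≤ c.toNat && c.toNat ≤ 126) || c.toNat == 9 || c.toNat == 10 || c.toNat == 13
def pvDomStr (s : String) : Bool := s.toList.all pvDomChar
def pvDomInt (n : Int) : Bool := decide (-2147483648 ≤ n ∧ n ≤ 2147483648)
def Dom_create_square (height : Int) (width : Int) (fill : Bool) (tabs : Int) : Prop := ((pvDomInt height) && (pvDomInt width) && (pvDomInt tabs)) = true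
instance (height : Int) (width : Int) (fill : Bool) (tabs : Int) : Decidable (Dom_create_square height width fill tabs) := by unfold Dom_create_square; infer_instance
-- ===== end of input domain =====

-- B builds the grid column-major (each column created whole, endpoints patched in the hollow
-- case) and then transposes to rows, instead of A's row-major per-cell double loop (objective: alternative).

-- ===== PORT A =====
-- i and j are nonnegative wherever they are used as indices (they come from range(0, …)), so Int.toNat is exact here.
def create_square (height : Int) (width : Int) (fill : Bool) (tabs : Int) : List (List Bool) :=
  (PySem.List.pyRange 0 height 1).foldl
    (fun square i =>
      let square := square ++ [([] : List Bool)]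
      (PySem.List.pyRange 0 (width + tabs) 1).foldl
        (fun sq j =>
          let sq := sq.modify i.toNat (fun row => row ++ [false])   -- square[i].append(False)
          if i == 0 || i == height - 1 then
            sq.modify i.toNat (fun row => row.set j.toNat (decide (j ≥ tabs)))
          else if fill then
            sq.modify i.toNat (fun row => row.set j.toNat (decide (j ≥ tabs)))
          else
            sq.modify i.toNat (fun row => row.set j.toNat (j == tabs || j == width + tabs - 1)))
        square)
    []

-- ===== PORT B =====
-- col[-1] (a negative Python index on a nonempty list of length height) is ported as index height-1;
-- col[i] in the transposing comprehension always has 0 ≤ i < len(col), so getD is exact there.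
def create_square_alt (height : Int) (width : Int) (fill : Bool) (tabs : Int) : List (List Bool) :=
  if height ≤ 0 then [] else
  let n := width + tabs
  let cols := (PySem.List.pyRange 0 n 1).map (fun j =>
    if fill then
      List.replicate height.toNat (decide (j ≥ tabs))
    else
      let col := List.replicate height.toNat (j == tabs || j == n - 1)
      if 0 < height then
        let col := col.set 0 (decide (j ≥ tabs))
        col.set (col.length - 1) (decide (j ≥ tabs))
      else col)
  (PySem.List.pyRange 0 height 1).map (fun i => cols.map (fun col => col.getD i.toNat false))

-- ===== PRECONDITION & SPEC =====
def Spec_create_square (height : Int) (width : Int) (fill : Bool) (tabs : Int) (out : List (List Bool)) : Prop := out = create_square_alt height width fill tabs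
instance (height : Int) (width : Int) (fill : Bool) (tabs : Int) (out : List (List Bool)) : Decidable (Spec_create_square height width fill tabs out) := by unfold Spec_create_square; infer_instance

-- ===== CLAIM (what is proved, stated in full; the proofs are below) =====
def Claim_equal_create_square : Prop := ∀ (height : Int) (width : Int) (fill : Bool) (tabs : Int), Dom_create_square height width fill tabs → Spec_create_square height width fill tabs (create_square height width fill tabs)

-- ===== LEMMAS AND PROOFS =====

theorem pv_modify_append {α : Type} (l : List α) (r : α) (f : α → α) :
    (l ++ [r]).modify l.length f = l ++ [f r] := by
  induction l with
  | nil => simp [List.modify]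
  | cons a t ih => simpa [List.modify] using ih

theorem pv_set_append (r : List Bool) (v : Bool) :
    (r ++ [false]).set r.length v = r ++ [v] := by simp

-- the inner loop of A, with the row index fixed at the last row, appends one cell per j
theorem pv_inner_fold (c1 c2 : Bool) (f g : Int → Bool) (m : Int) :
    ∀ (n : ℕ) (a : Int) (pre : List (List Bool)) (r : List Bool),
      0 ≤ a → r.length = a.toNat → n = (m - a).toNat →
      (PySem.List.pyRange a m 1).foldl
        (fun sq j =>
          let sq := sq.modify pre.length (fun row => row ++ [false])
          if c1 then sq.modify pre.length (fun row => row.set j.toNat (f j))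
          else if c2 then sq.modify pre.length (fun row => row.set j.toNat (f j))
          else sq.modify pre.length (fun row => row.set j.toNat (g j)))
        (pre ++ [r])
      = pre ++ [r ++ (PySem.List.pyRange a m 1).map (fun j => if c1 || c2 then f j else g j)] := by
  intro n
  induction n with
  | zero =>
    intro a pre r ha hr hn
    rw [show PySem.List.pyRange a m 1 = [] from PySem.List.pyRange_one_eq_nil (by omega)]
    simp
  | succ n ih =>
    intro a pre r ha hr hn
    have ham : a < m := by omega
    rw [show PySem.List.pyRange a m 1 = a :: PySem.List.pyRange (a+1) m 1 from PySem.List.pyRange_one_cons ham]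
    simp only [List.foldl_cons, List.map_cons]
    have hstep : ∀ v : Bool,
        ((pre ++ [r]).modify pre.length (fun row => row ++ [false])).modify pre.length
          (fun row => row.set a.toNat v) = pre ++ [r ++ [v]] := by
      intro v
      rw [pv_modify_append, pv_modify_append, ← hr, pv_set_append]
    have hlen : (r ++ [if c1 || c2 then f a else g a]).length = (a + 1).toNat := by
      simp [hr]; omega
    have hrec := ih (a + 1) pre (r ++ [if c1 || c2 then f a else g a]) (by omega) hlen (by omega)
    cases c1 <;> cases c2 <;>
      simp only [Bool.false_or, Bool.true_or, Bool.false_eq_true, if_true, if_false, hstep] at hrec ⊢ <;>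
      rw [hrec] <;> simp

-- the outer loop of A appends one fully-built row per i
theorem pv_outer_fold (height width tabs : Int) (fill : Bool) :
    ∀ (n : ℕ) (a : Int) (pre : List (List Bool)),
      0 ≤ a → pre.length = a.toNat → n = (height - a).toNat →
      (PySem.List.pyRange a height 1).foldl
        (fun square i =>
          let square := square ++ [([] : List Bool)]
          (PySem.List.pyRange 0 (width + tabs) 1).foldl
            (fun sq j =>
              let sq := sq.modify i.toNat (fun row => row ++ [false])
              if i == 0 || i == height - 1 then
                sq.modify i.toNat (fun row => row.set j.toNat (decide (j ≥ tabs)))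
              else if fill then
                sq.modify i.toNat (fun row => row.set j.toNat (decide (j ≥ tabs)))
              else
                sq.modify i.toNat (fun row => row.set j.toNat (j == tabs || j == width + tabs - 1)))
            square)
        pre
      = pre ++ (PySem.List.pyRange a height 1).map (fun i =>
          (PySem.List.pyRange 0 (width + tabs) 1).map (fun j =>
            if (i == 0 || i == height - 1) || fill then decide (j ≥ tabs)
            else (j == tabs || j == width + tabs - 1))) := by
  intro n
  induction n with
  | zero =>
    intro a pre ha hp hn
    rw [show PySem.List.pyRange a height 1 = [] from PySem.List.pyRange_one_eq_nil (by omega)]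
    simp
  | succ n ih =>
    intro a pre ha hp hn
    have hah : a < height := by omega
    rw [show PySem.List.pyRange a height 1 = a :: PySem.List.pyRange (a+1) height 1 from PySem.List.pyRange_one_cons hah]
    simp only [List.foldl_cons, List.map_cons]
    have hinner := pv_inner_fold (a == 0 || a == height - 1) fill
        (fun j => decide (j ≥ tabs)) (fun j => (j == tabs || j == width + tabs - 1))
        (width + tabs) (width + tabs - 0).toNat 0 pre [] (le_refl 0) rfl rfl
    have hidx : a.toNat = pre.length := hp.symm
    rw [hidx]
    rw [hinner]
    have hrec := ih (a + 1) (pre ++ [(PySem.List.pyRange 0 (width + tabs) 1).map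
        (fun j => if (a == 0 || a == height - 1) || fill then decide (j ≥ tabs)
                  else (j == tabs || j == width + tabs - 1))])
      (by omega) (by simp [hp]; omega) (by omega)
    simp only [List.nil_append] at hinner ⊢
    rw [hrec]
    simp

theorem create_square_eq_map (height width tabs : Int) (fill : Bool) :
    create_square height width fill tabs
      = (PySem.List.pyRange 0 height 1).map (fun i =>
          (PySem.List.pyRange 0 (width + tabs) 1).map (fun j =>
            if (i == 0 || i == height - 1) || fill then decide (j ≥ tabs)
            else (j == tabs || j == width + tabs - 1))) := by
  have h := pv_outer_fold height width tabs fill (height - 0).toNat 0 [] (le_refl 0) rfl rfl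
  simpa [create_square] using h

-- reading entry t of a hollow column: constant m with both ends set to e
theorem pv_col_getD (h t : ℕ) (e m : Bool) (ht : t < h) :
    (((List.replicate h m).set 0 e).set (((List.replicate h m).set 0 e).length - 1) e).getD t false
      = if t = 0 ∨ t = h - 1 then e else m := by
  simp only [List.length_set, List.length_replicate]
  rw [List.getD_eq_getElem?_getD]
  simp only [List.getElem?_set, List.getElem?_replicate, List.length_set, List.length_replicate]
  split_ifs <;> simp_all <;> omega

-- ===== VERDICT (by name: the statement is the Claim_ definition above) =====
theorem create_square_spec : Claim_equal_create_square := by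
  intro height width fill tabs _
  unfold Spec_create_square create_square_alt
  rw [create_square_eq_map]
  by_cases hh : height ≤ 0
  · rw [if_pos hh, PySem.List.pyRange_one_eq_nil hh, List.map_nil]
  rw [if_neg hh]
  simp only [List.map_map]
  refine List.map_congr_left (fun i hi => ?_)
  rw [PySem.List.mem_pyRange_one] at hi
  have hti : i.toNat < height.toNat := by omega
  refine List.map_congr_left (fun j _ => ?_)
  simp only [Function.comp_apply]
  by_cases hf : fill
  · subst hf
    simp [List.getD_eq_getElem?_getD, hti]
  · simp only [hf, Bool.or_false, if_pos, show (0 : Int) < height by omega,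
      Bool.false_eq_true, if_false]
    rw [pv_col_getD height.toNat i.toNat _ _ hti]
    obtain ⟨hi0, hih⟩ := hi
    by_cases hc : i = 0 ∨ i = height - 1
    · have h1 : (i == 0 || i == height - 1) = true := by
        rcases hc with h | h <;> simp [h]
      have h2 : i.toNat = 0 ∨ i.toNat = height.toNat - 1 := by
        rcases hc with h | h
        · left; omega
        · right; omega
      rw [if_pos h1, if_pos h2]
    · push Not at hc
      have h2 : ¬(i.toNat = 0 ∨ i.toNat = height.toNat - 1) := by
        push Not
        exact ⟨by omega, by omega⟩
      rw [if_neg (by simp [hc.1, hc.2]), if_neg h2]
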